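-- pv_equiv track=rewrite | github.com/binggroup/WXAnalyseProject | src/jieba_analysis/parse_sentiment.py | stock_count
-- ===== SOURCE A (Python) =====
-- def stock_count(split_article,userdict):
--     stock_dict = {}
--     for word in split_article.strip().split(" "):
--         if word in userdict:
--             if dict(stock_dict).__contains__(word):
--                 stock_dict[word] += 1
--             else:
--                 stock_dict[word] = 1
--     return stock_dict
-- ===== SOURCE B (Python) =====
-- def stock_count(split_article, userdict):
--     hits = [w for w in split_article.strip().split(" ") if w in userdict]
--
--     def go(ws):
--         if not ws:
--             return {}
--         w, rest = ws[0], ws[1:]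
--         out = {w: ws.count(w)}
--         out.update(go([x for x in rest if x != w]))
--         return out
--
--     return go(hits)
-- ===== Notes on version B (the rewrite author's own statement) =====
-- stated objective: alternative
-- what changed: Replaces A's single-pass incremental dict accumulation with a filter-then-recurse strategy: first filter the words to those in userdict, then recursively peel off the first word, count its occurrences, and recurse on the remainder with that word removed.
import Mathlib
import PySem

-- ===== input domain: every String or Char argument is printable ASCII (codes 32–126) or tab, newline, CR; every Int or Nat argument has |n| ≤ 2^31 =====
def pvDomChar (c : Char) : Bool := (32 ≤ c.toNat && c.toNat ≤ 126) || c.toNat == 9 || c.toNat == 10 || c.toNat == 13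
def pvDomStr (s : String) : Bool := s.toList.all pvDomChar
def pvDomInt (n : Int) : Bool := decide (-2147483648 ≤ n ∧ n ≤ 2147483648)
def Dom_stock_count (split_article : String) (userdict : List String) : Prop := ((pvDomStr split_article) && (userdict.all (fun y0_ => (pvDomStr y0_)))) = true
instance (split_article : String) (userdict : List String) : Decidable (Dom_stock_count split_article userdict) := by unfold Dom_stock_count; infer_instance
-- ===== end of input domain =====

-- B replaces A's single-pass incremental dict accumulation with filter-then-recurse:
-- filter the words to dictionary hits, then peel off the first word, count it, and
-- recurse on the remainder with that word removed (objective: alternative).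

-- ===== PORT A =====
def stock_count (split_article : String) (userdict : List String) : List (String × Int) :=
  (((PySem.Str.strip split_article).splitOn " ").foldl
    (fun (d : PySem.Dict String Int) word =>
      if userdict.contains word then
        if d.contains word then d.insert word (d.getD word 0 + 1)
        else d.insert word 1
      else d)
    PySem.Dict.empty).items

-- ===== PORT B =====
def stockGo : List String → List (String × Int)
  | [] => []
  | w :: rest =>
    (w, ((w :: rest).count w : Int)) :: stockGo (rest.filter (fun x => x != w))
termination_by l => l.length
decreasing_by
  simp only [List.length_cons, List.length_unattach, Nat.lt_succ_iff]
  exact le_trans (List.length_filter_le _ _) (by simp)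

def stock_count_alt (split_article : String) (userdict : List String) : List (String × Int) :=
  stockGo (((PySem.Str.strip split_article).splitOn " ").filter (fun w => userdict.contains w))

-- ===== PRECONDITION & SPEC =====
def Spec_stock_count (split_article : String) (userdict : List String) (out : List (String × Int)) : Prop := out = stock_count_alt split_article userdict
instance (split_article : String) (userdict : List String) (out : List (String × Int)) : Decidable (Spec_stock_count split_article userdict out) := by unfold Spec_stock_count; infer_instance

-- ===== CLAIM (what is proved, stated in full; the proofs are below) =====
def Claim_equal_stock_count : Prop := ∀ (split_article : String) (userdict : List String), Dom_stock_count split_article userdict → Spec_stock_count split_article userdict (stock_count split_article userdict)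

-- ===== LEMMAS AND PROOFS =====

-- folding with a guard is folding over the filter
theorem foldl_guard_filter {α β : Type} (p : α → Bool) (g : β → α → β) (l : List α) (d : β) :
    l.foldl (fun d x => if p x then g d x else d) d = (l.filter p).foldl g d := by
  induction l generalizing d with
  | nil => rfl
  | cons x xs ih =>
    by_cases h : p x = true <;> simp [h, ih]

-- A's two-branch step is exactly the counter step
theorem step_eq_counter_step (d : PySem.Dict String Int) (w : String) :
    (if d.contains w then d.insert w (d.getD w 0 + 1) else d.insert w 1)
      = d.insert w (d.getD w 0 + 1) := by
  by_cases h : d.contains w = true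
  · simp [h]
  · rw [if_neg h, PySem.Dict.getD_of_not_contains _ _ (by simpa using h)]
    norm_num

-- stockGo computes Counter(l).items()
theorem discard_ofList (w : String) : ∀ (l : List String),
    (PySem.Set.ofList l).discard w = PySem.Set.ofList (l.filter (fun x => x != w))
  | [] => rfl
  | y :: ys => by
    by_cases hyw : y = w
    · subst hyw
      simp only [List.filter_cons, bne_self_eq_false, Bool.false_eq_true, if_false,
        PySem.Set.ofList_cons, ← discard_ofList y ys]
      simp only [PySem.Set.discard]
      rw [List.filter_cons]
      simp [List.filter_filter]
    · simp only [List.filter_cons, show (y != w) = true by simp [hyw], if_pos,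
        PySem.Set.ofList_cons, ← discard_ofList w ys]
      simp only [PySem.Set.discard]
      rw [List.filter_cons]
      simp only [show (!y == w) = true by simp [hyw], if_pos]
      congr 1
      rw [List.filter_filter, List.filter_filter]
      apply List.filter_congr
      intro a _
      exact Bool.and_comm _ _

theorem stockGo_eq_map_dedup : ∀ (n : Nat) (l : List String), l.length ≤ n →
    stockGo l = (PySem.List.dedup l).map (fun k => (k, (l.count k : Int)))
  | _, [], _ => by simp [stockGo]
  | Nat.zero, _ :: _, h => by simp at h
  | Nat.succ n, w :: rest, h => by
    have ih := stockGo_eq_map_dedup n (rest.filter (fun x => x != w))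
      (le_trans (List.length_filter_le _ _) (by simpa using h))
    rw [stockGo, ih]
    simp only [PySem.List.dedup_eq_ofList]
    have hdedup : PySem.Set.ofList (w :: rest)
        = w :: PySem.Set.ofList (rest.filter (fun x => x != w)) := by
      rw [PySem.Set.ofList_cons, discard_ofList]
    rw [hdedup]
    simp only [List.map_cons]
    congr 1
    apply List.map_congr_left
    intro k hk
    have hkw : k ≠ w := by
      have h1 := (PySem.Set.mem_ofList _ _).mp hk
      have := List.of_mem_filter h1
      simpa using this
    have h1 : (w :: rest).count k = rest.count k := by
      rw [List.count_cons]
      simp [Ne.symm hkw]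
    have h2 : (rest.filter (fun x => x != w)).count k = rest.count k := by
      rw [List.count_filter (by simp [hkw])]
    simp [h1, h2]

theorem stock_count_eq (split_article : String) (userdict : List String) :
    stock_count split_article userdict = stock_count_alt split_article userdict := by
  unfold stock_count stock_count_alt
  rw [foldl_guard_filter]
  have : (((PySem.Str.strip split_article).splitOn " ").filter (fun w => userdict.contains w)).foldl
      (fun (d : PySem.Dict String Int) word =>
        if d.contains word then d.insert word (d.getD word 0 + 1)
        else d.insert word 1) PySem.Dict.empty
      = PySem.Dict.counter
          (((PySem.Str.strip split_article).splitOn " ").filter (fun w => userdict.contains w)) := by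
    rw [show (fun (d : PySem.Dict String Int) word =>
        if d.contains word then d.insert word (d.getD word 0 + 1)
        else d.insert word 1)
      = fun (d : PySem.Dict String Int) word => d.insert word (d.getD word 0 + 1) from
      funext fun d => funext fun word => step_eq_counter_step d word]
    exact PySem.Dict.foldl_insert_getD_add_one_eq_counter _
  rw [this, PySem.Dict.items_counter,
    ← PySem.List.dedup_eq_ofList,
    ← stockGo_eq_map_dedup _ _ (le_refl _)]

-- ===== VERDICT (by name: the statement is the Claim_ definition above) =====
theorem stock_count_spec : Claim_equal_stock_count := by
  intro sa ud _
  unfold Spec_stock_count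
  exact stock_count_eq sa ud
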